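-- pv_equiv track=rewrite | github.com/todayis-sunny/Algorithm | 프로그래머스/3/131703. 2차원 동전 뒤집기/2차원 동전 뒤집기.py | solution
-- ===== SOURCE A (Python) =====
-- INF = 1e9
--
-- def solution(beginning, target):
--     rowMax = len(beginning)
--     colMax = len(beginning[0])
--     goal = [[0] * colMax for _ in range(rowMax)]
--     for r in range(rowMax):
--         for c in range(colMax):
--             # XOR 연산으로 다른 구역만 1로 체크
--             goal[r][c] = beginning[r][c] ^ target[r][c]
--
--     # 0행을 뒤집지 않고 진행
--     answer = INF
--     count = 0
--     board = [[0] * colMax for _ in range(rowMax)]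
--     for c in range(colMax):
--         # c열을 뒤집지 않아도 된다면 스킵
--         if goal[0][c] == 0:
--             continue
--         count += 1
--         for r in range(rowMax):
--             board[r][c] += 1
--     # 나머지 행 검사
--     for r in range(1, rowMax):
--         # r행을 뒤집지 않아도 된다면 스킵
--         if goal[r][0] == board[r][0]:
--             continue
--         count += 1
--         for c in range(colMax):
--             board[r][c] += 1
--     if check(board, goal):
--         answer = count
--
--     # 0행을 뒤집고 진행
--     count = 1
--     board = [[0] * colMax for _ in range(rowMax)]
--     for c in range(colMax):
--         board[0][c] += 1
--
--     for c in range(colMax):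
--         # c열을 뒤집지 않아도 된다면 스킵
--         if goal[0][c] == 1:
--             continue
--         count += 1
--         for r in range(rowMax):
--             board[r][c] += 1
--     # 나머지 행 검사
--     for r in range(1, rowMax):
--         # r행을 뒤집지 않아도 된다면 스킵
--         if goal[r][0] == board[r][0]:
--             continue
--         count += 1
--         for c in range(colMax):
--             board[r][c] += 1
--     if check(board, goal):
--         answer = min(count, answer)
--
--     if answer == INF:
--         return -1
--     return answer
--
-- def check(board, goal):
--     for r in range(len(board)):
--         for c in range(len(board[0])):
--             if board[r][c] % 2 != goal[r][c]:
--                 return False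
--     return True
-- ===== SOURCE B (Python) =====
-- def solution(beginning, target):
--     rows = len(beginning)
--     cols = len(beginning[0])
--     row0 = [beginning[0][c] ^ target[0][c] for c in range(cols)]
--     if any(x != 0 and x != 1 for x in row0):
--         return -1
--     comp = [x ^ 1 for x in row0]
--     same = flipped = 0
--     for r in range(1, rows):
--         row = [beginning[r][c] ^ target[r][c] for c in range(cols)]
--         if row == row0:
--             same += 1
--         elif row == comp:
--             flipped += 1
--         else:
--             return -1
--     ones = sum(row0)
--     return min(ones + flipped, 1 + (cols - ones) + same)
-- ===== Notes on version B (the rewrite author's own statement) =====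
-- stated objective: alternative
-- what changed: A enumerates the two first-row-flip cases, simulates each case's flips on a mutable count matrix (board) and re-runs a full-grid parity check per case; B has no case enumeration, no flip simulation and no board: it checks the first XOR-difference row is 0/1-valued, classifies every later difference row in one pass as equal to row0 or to its elementwise complement (returning -1 at the first unclassifiable row), and finishes with the min of the two closed-form counts ones+flipped and 1+(cols-ones)+same (constant-factor speedup: one pass, whole-row comparisons, no board updates). …
import Mathlib
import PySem

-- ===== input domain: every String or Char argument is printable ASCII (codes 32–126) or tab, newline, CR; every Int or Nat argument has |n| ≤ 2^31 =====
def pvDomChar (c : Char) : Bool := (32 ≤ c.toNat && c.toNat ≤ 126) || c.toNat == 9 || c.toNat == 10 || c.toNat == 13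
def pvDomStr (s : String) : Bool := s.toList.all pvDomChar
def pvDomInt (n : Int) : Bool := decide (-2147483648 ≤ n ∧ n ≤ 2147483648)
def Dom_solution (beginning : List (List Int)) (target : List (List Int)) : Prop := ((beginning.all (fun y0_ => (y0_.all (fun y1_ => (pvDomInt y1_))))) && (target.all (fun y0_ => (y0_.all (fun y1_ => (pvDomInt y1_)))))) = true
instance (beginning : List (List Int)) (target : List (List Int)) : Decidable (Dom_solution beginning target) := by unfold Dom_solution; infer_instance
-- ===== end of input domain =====

-- B drops A's whole strategy of enumerating the two first-row cases and simulating each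
-- case's flips on a count matrix with a final parity-check pass: it classifies every
-- difference row against row 0 / its complement in one pass and returns the min of two
-- closed-form counts (a constant-factor speedup, measured, and O(C)
-- instead of O(R*C) extra space).

-- ===== PORT A =====
-- helpers = A's loop blocks (A's two cases duplicate the same loops with constants 0/1)

-- board[r][c] += 1
def pvIncAt (c : Nat) (row : List Int) : List Int := row.set c (row.getD c 0 + 1)

-- goal[r][c] = beginning[r][c] ^ target[r][c]  (inner loop over c, of the building loop)
def pvGoalRow (b t : List (List Int)) (r : Nat) (colMax : Nat) (g : List (List Int)) : List (List Int) :=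
  (List.range colMax).foldl
    (fun m c => m.set r ((m.getD r []).set c
      (PySem.Int.bxor ((b.getD r []).getD c 0) ((t.getD r []).getD c 0)))) g

def pvGoalLoop (b t : List (List Int)) (rowMax colMax : Nat) : List (List Int) :=
  (List.range rowMax).foldl (fun m r => pvGoalRow b t r colMax m)
    (List.replicate rowMax (List.replicate colMax 0))

-- for r in range(rowMax): board[r][c] += 1
def pvIncCol (c : Nat) (rowMax : Nat) (bd : List (List Int)) : List (List Int) :=
  (List.range rowMax).foldl (fun m r => m.set r (pvIncAt c (m.getD r []))) bd

-- for c in range(colMax): board[r][c] += 1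
def pvIncRowAt (r : Nat) (colMax : Nat) (bd : List (List Int)) : List (List Int) :=
  (List.range colMax).foldl (fun m c => m.set r (pvIncAt c (m.getD r []))) bd

-- the column loop of a case: cmp is the constant A compares goal[0][c] with (0 resp. 1)
def pvColPhase (goal : List (List Int)) (cmp : Int) (rowMax colMax : Nat)
    (s0 : Int × List (List Int)) : Int × List (List Int) :=
  (List.range colMax).foldl
    (fun s c => if (goal.getD 0 []).getD c 0 == cmp then s
                else (s.1 + 1, pvIncCol c rowMax s.2)) s0

-- the loop over rows 1..rowMax-1 of a case (identical in both cases)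
def pvRowPhase (goal : List (List Int)) (rowMax colMax : Nat)
    (s0 : Int × List (List Int)) : Int × List (List Int) :=
  (List.range (rowMax - 1)).foldl
    (fun s r1 =>
      if (goal.getD (r1 + 1) []).getD 0 0 == (s.2.getD (r1 + 1) []).getD 0 0 then s
      else (s.1 + 1, pvIncRowAt (r1 + 1) colMax s.2)) s0

-- def check(board, goal)
def pvCheck (board goal : List (List Int)) : Bool :=
  (List.range board.length).all (fun r =>
    (List.range ((board.getD 0 []).length)).all (fun c =>
      PySem.Int.mod ((board.getD r []).getD c 0) 2 == (goal.getD r []).getD c 0))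

def solution (beginning : List (List Int)) (target : List (List Int)) : Int :=
  let rowMax := beginning.length
  let colMax := (beginning.headD []).length
  let goal := pvGoalLoop beginning target rowMax colMax
  -- 0행을 뒤집지 않고 진행
  let s0 := pvRowPhase goal rowMax colMax
      (pvColPhase goal 0 rowMax colMax (0, List.replicate rowMax (List.replicate colMax 0)))
  let answer : Int := if pvCheck s0.2 goal then s0.1 else 1000000000
  -- 0행을 뒤집고 진행
  let s1 := pvRowPhase goal rowMax colMax
      (pvColPhase goal 1 rowMax colMax
        (1, pvIncRowAt 0 colMax (List.replicate rowMax (List.replicate colMax 0))))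
  let answer := if pvCheck s1.2 goal then min s1.1 answer else answer
  if answer == 1000000000 then -1 else answer

-- ===== PORT B =====
-- row r of the XOR-difference grid: [beginning[r][c] ^ target[r][c] for c in range(cols)]
def pvDiffRow (beginning target : List (List Int)) (cols r : Nat) : List Int :=
  (List.range cols).map (fun c =>
    PySem.Int.bxor ((beginning.getD r []).getD c 0) ((target.getD r []).getD c 0))

def solution_alt (beginning : List (List Int)) (target : List (List Int)) : Int :=
  let rows := beginning.length
  let cols := (beginning.headD []).length
  let row0 := pvDiffRow beginning target cols 0
  if row0.any (fun x => !(x == 0) && !(x == 1)) then -1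
  else
    let comp := row0.map (fun x => PySem.Int.bxor x 1)
    -- for r in range(1, rows): classify each diff row; early 'return -1' = the none state
    match (List.range (rows - 1)).foldl (fun st r1 =>
        st.bind (fun m =>
          if pvDiffRow beginning target cols (r1 + 1) == row0 then some (m.1 + 1, m.2)
          else if pvDiffRow beginning target cols (r1 + 1) == comp then some (m.1, m.2 + 1)
          else none))
      (some ((0 : Int), (0 : Int))) with
    | none => -1
    | some m => min (row0.sum + m.2) (1 + ((cols : Int) - row0.sum) + m.1)

-- ===== PRECONDITION & SPEC =====
-- Pre_ is A's crash-free domain: nonempty grid, every accessed row long enough, and no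
-- empty first row when a second row exists (A reads goal[r][0] there) — outside these A
-- raises IndexError. The last clause excludes grids with rows+columns ≥ 10^9: such an
-- input needs ≥ 5·10^8 list cells, so A cannot be evaluated on it (it raises MemoryError
-- allocating its goal/board matrices; there a genuine flip count could also collide with
-- A's 1e9 sentinel).
def Pre_solution (beginning : List (List Int)) (target : List (List Int)) : Prop :=
  beginning ≠ [] ∧
  (∀ row ∈ beginning, (beginning.headD []).length ≤ row.length) ∧
  beginning.length ≤ target.length ∧
  (∀ i < beginning.length, (beginning.headD []).length ≤ (target.getD i []).length) ∧
  (beginning.length ≤ 1 ∨ 1 ≤ (beginning.headD []).length) ∧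
  beginning.length + (beginning.headD []).length < 1000000000
instance (beginning : List (List Int)) (target : List (List Int)) : Decidable (Pre_solution beginning target) := by unfold Pre_solution; infer_instance

def pvWitness_solution : List (List Int) × List (List Int) :=
  ([[0, 1], [1, 0]], [[1, 1], [0, 0]])

def Spec_solution (beginning : List (List Int)) (target : List (List Int)) (out : Int) : Prop := out = solution_alt beginning target
instance (beginning : List (List Int)) (target : List (List Int)) (out : Int) : Decidable (Spec_solution beginning target out) := by unfold Spec_solution; infer_instance

-- ===== CLAIM (what is proved, stated in full; the proofs are below) =====
def Claim_equal_solution : Prop := ∀ (beginning : List (List Int)) (target : List (List Int)), Dom_solution beginning target → Pre_solution beginning target → Spec_solution beginning target (solution beginning target)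

-- ===== LEMMAS AND PROOFS =====

theorem pvWitness_ok : Dom_solution pvWitness_solution.1 pvWitness_solution.2 ∧
    Pre_solution pvWitness_solution.1 pvWitness_solution.2 := by decide

theorem foldl_set_generic {α : Type} (d : α) (W : Nat → α → α) :
    ∀ (k : Nat) (l : List α), k ≤ l.length →
      (List.range k).foldl (fun acc i => acc.set i (W i (acc.getD i d))) l
        = (List.range k).map (fun i => W i (l.getD i d)) ++ l.drop k := by
  intro k
  induction k with
  | zero => simp
  | succ n ih =>
    intro l hl
    have hn : n < l.length := by omega
    rw [List.range_succ, List.foldl_append, List.map_append, ih l (by omega)]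
    simp only [List.foldl_cons, List.foldl_nil, List.map_cons, List.map_nil]
    have hM : ((List.range n).map (fun i => W i (l.getD i d))).length = n := by simp
    have hget : (((List.range n).map (fun i => W i (l.getD i d))) ++ l.drop n).getD n d
        = l.getD n d := by
      rw [List.getD_eq_getElem?_getD, List.getElem?_append_right (by omega), hM, Nat.sub_self,
        List.getD_eq_getElem?_getD, List.getElem?_drop]
      simp
    rw [hget, List.set_append, if_neg (by omega), hM, Nat.sub_self,
      List.drop_eq_getElem_cons hn, List.set_cons_zero, List.getD_eq_getElem l d hn]
    simp

theorem foldl_set_vals (V : Nat → Int) (k : Nat) (l : List Int) (h : k ≤ l.length) :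
    (List.range k).foldl (fun row c => row.set c (V c)) l
      = (List.range k).map V ++ l.drop k := by
  have := foldl_set_generic 0 (fun c _ => V c) k l h
  simpa using this

theorem foldl_incAt (k : Nat) (l : List Int) (h : k ≤ l.length) :
    (List.range k).foldl (fun row c => pvIncAt c row) l
      = (List.range k).map (fun c => l.getD c 0 + 1) ++ l.drop k := by
  have := foldl_set_generic 0 (fun _ (x : Int) => x + 1) k l h
  simpa [pvIncAt] using this

theorem foldl_set_rows (F : List Int → List Int) (k : Nat) (bd : List (List Int)) (h : k ≤ bd.length) :
    (List.range k).foldl (fun m r => m.set r (F (m.getD r []))) bd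
      = (List.range k).map (fun r => F (bd.getD r [])) ++ bd.drop k := by
  exact foldl_set_generic [] (fun _ row => F row) k bd h

theorem foldl_matrix_row (r : Nat) (step : Nat → List Int → List Int) :
    ∀ (k : Nat) (g : List (List Int)), r < g.length →
      (List.range k).foldl (fun m c => m.set r (step c (m.getD r []))) g
        = g.set r ((List.range k).foldl (fun row c => step c row) (g.getD r [])) := by
  intro k
  induction k with
  | zero =>
    intro g hr
    rw [List.range_zero, List.foldl_nil, List.foldl_nil, List.getD_eq_getElem g [] hr,
      List.set_getElem_self]
  | succ n ih =>
    intro g hr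
    rw [List.range_succ, List.foldl_append, List.foldl_append, ih g hr]
    simp only [List.foldl_cons, List.foldl_nil]
    rw [show ((g.set r ((List.range n).foldl (fun row c => step c row) (g.getD r []))).getD r [])
        = (List.range n).foldl (fun row c => step c row) (g.getD r []) from by
      simp [List.getD_eq_getElem?_getD, hr], List.set_set]

theorem map_range_getD' {α β : Type} (d : α) (f : α → β) (l : List α) :
    (List.range l.length).map (fun i => f (l.getD i d)) = l.map f := by
  apply List.ext_getElem
  · simp
  · intro i h1 h2
    simp only [List.length_map] at h2
    simp [List.getD_eq_getElem?_getD, List.getElem?_eq_getElem h2]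

theorem pvIncCol_eq (c : Nat) (bd : List (List Int)) :
    pvIncCol c bd.length bd = bd.map (pvIncAt c) := by
  unfold pvIncCol
  rw [foldl_set_rows (pvIncAt c) bd.length bd le_rfl, List.drop_length, List.append_nil,
    map_range_getD' [] (pvIncAt c) bd]

theorem pvIncRowAt_eq (r colMax : Nat) (bd : List (List Int)) (hr : r < bd.length)
    (hlen : (bd.getD r []).length = colMax) :
    pvIncRowAt r colMax bd = bd.set r ((bd.getD r []).map (· + 1)) := by
  unfold pvIncRowAt
  rw [foldl_matrix_row r pvIncAt colMax bd hr]
  subst hlen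
  rw [foldl_incAt (bd.getD r []).length (bd.getD r []) le_rfl, List.drop_length,
    List.append_nil]
  rw [show (fun c => (bd.getD r []).getD c 0 + 1) = (fun c => (fun x => x + 1) ((bd.getD r []).getD c 0)) from rfl,
    map_range_getD' 0 (fun x => x + 1) (bd.getD r [])]

-- goal entry
def pvE (b t : List (List Int)) (r c : Nat) : Int :=
  PySem.Int.bxor ((b.getD r []).getD c 0) ((t.getD r []).getD c 0)

theorem pvE_def (b t : List (List Int)) (r c : Nat) :
    PySem.Int.bxor ((b.getD r []).getD c 0) ((t.getD r []).getD c 0) = pvE b t r c := rfl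

theorem pvGoalRow_eq (b t : List (List Int)) (r colMax : Nat) (g : List (List Int))
    (hr : r < g.length) (hlen : (g.getD r []).length = colMax) :
    pvGoalRow b t r colMax g = g.set r ((List.range colMax).map (pvE b t r)) := by
  unfold pvGoalRow
  simp only [pvE_def]
  rw [foldl_matrix_row r (fun c row => row.set c (pvE b t r c)) colMax g hr]
  congr 1
  rw [foldl_set_vals (pvE b t r) colMax (g.getD r []) (by omega), ← hlen,
    List.drop_length, List.append_nil]

theorem pvGoalLoop_eq (b t : List (List Int)) (R C : Nat) :
    pvGoalLoop b t R C = (List.range R).map (fun r => (List.range C).map (pvE b t r)) := by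
  unfold pvGoalLoop
  suffices h : ∀ k, k ≤ R →
      (List.range k).foldl (fun m r => pvGoalRow b t r C m)
        (List.replicate R (List.replicate C 0))
      = (List.range k).map (fun r => (List.range C).map (pvE b t r))
        ++ List.replicate (R - k) (List.replicate C 0) by
    have := h R le_rfl
    simpa using this
  intro k
  induction k with
  | zero => simp
  | succ n ih =>
    intro hk
    rw [List.range_succ, List.foldl_append, List.foldl_cons, List.foldl_nil, ih (by omega)]
    have hlen : ((List.range n).map (fun r => (List.range C).map (pvE b t r))
        ++ List.replicate (R - n) (List.replicate C (0:Int))).length = R := by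
      simp; omega
    have hget : ((List.range n).map (fun r => (List.range C).map (pvE b t r))
        ++ List.replicate (R - n) (List.replicate C (0:Int))).getD n [] = List.replicate C 0 := by
      rw [List.getD_eq_getElem?_getD, List.getElem?_append_right (by simp), ]
      simp only [List.length_map, List.length_range]
      rw [Nat.sub_self]
      have : 0 < R - n := by omega
      simp [this]
    rw [pvGoalRow_eq b t n C _ (by omega) (by rw [hget]; simp)]
    rw [List.set_append, if_neg (by simp), List.map_append]
    simp only [List.length_map, List.length_range, Nat.sub_self]
    have hrep : List.replicate (R - n) (List.replicate C (0:Int))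
        = List.replicate C 0 :: List.replicate (R - (n+1)) (List.replicate C 0) := by
      have : R - n = (R - (n+1)) + 1 := by omega
      rw [this, List.replicate_succ]
    rw [hrep, List.set_cons_zero]
    simp

-- ---- column phase ----
def pvColsPartial (g0 : List Int) (cmp : Int) (C k : Nat) (base : Int) : List Int :=
  (List.range C).map (fun c => base + if c < k ∧ (g0.getD c 0 == cmp) = false then 1 else 0)

theorem pvColsPartial_length (g0 : List Int) (cmp : Int) (C k : Nat) (base : Int) :
    (pvColsPartial g0 cmp C k base).length = C := by simp [pvColsPartial]

theorem pvColsPartial_getD (g0 : List Int) (cmp : Int) (C k : Nat) (base : Int)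
    (c : Nat) (hc : c < C) :
    (pvColsPartial g0 cmp C k base).getD c 0
      = base + if c < k ∧ (g0.getD c 0 == cmp) = false then 1 else 0 := by
  simp [pvColsPartial, List.getD_eq_getElem?_getD, hc]

theorem pvColsPartial_zero (g0 : List Int) (cmp : Int) (C : Nat) (base : Int) :
    pvColsPartial g0 cmp C 0 base = (List.range C).map (fun _ => base) := by
  unfold pvColsPartial
  apply List.map_congr_left
  intro c _
  simp

theorem pvColsPartial_stable (g0 : List Int) (cmp : Int) (C k : Nat) (base : Int)
    (hb : (g0.getD k 0 == cmp) = true) :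
    pvColsPartial g0 cmp C (k + 1) base = pvColsPartial g0 cmp C k base := by
  unfold pvColsPartial
  apply List.map_congr_left
  intro c _
  by_cases hck : c < k
  · simp [hck, Nat.lt_succ_of_lt hck]
  · by_cases hck1 : c < k + 1
    · have hck2 : c = k := by omega
      subst hck2
      have hcond : ¬ (c < c + 1 ∧ (g0.getD c 0 == cmp) = false) := by
        rintro ⟨-, hf⟩
        rw [hb] at hf
        cases hf
      rw [if_neg hcond, if_neg (by rintro ⟨h1, -⟩; exact hck h1)]
    · simp [hck, hck1]

theorem pvIncAt_colsPartial (g0 : List Int) (cmp : Int) (C k : Nat) (base : Int)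
    (hk : k < C) (hb : (g0.getD k 0 == cmp) = false) :
    pvIncAt k (pvColsPartial g0 cmp C k base) = pvColsPartial g0 cmp C (k + 1) base := by
  unfold pvIncAt
  apply List.ext_getElem
  · simp [pvColsPartial_length]
  · intro i h1 h2
    simp only [List.length_set, pvColsPartial_length] at h1
    rw [List.getElem_set]
    by_cases hik : i = k
    · subst hik
      rw [if_pos rfl, pvColsPartial_getD g0 cmp C i base i hk]
      unfold pvColsPartial
      simp only [List.getElem_map, List.getElem_range]
      rw [if_neg (by rintro ⟨h3, -⟩; omega), if_pos ⟨Nat.lt_succ_self i, hb⟩]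
      ring
    · rw [if_neg (by omega : ¬ k = i)]
      unfold pvColsPartial
      simp only [List.getElem_map, List.getElem_range]
      congr 1
      exact if_congr (by constructor <;> rintro ⟨h3, h4⟩ <;> exact ⟨by omega, h4⟩) rfl rfl

theorem pvIncCol_eq' (c R' : Nat) (bd : List (List Int)) (h : bd.length = R') :
    pvIncCol c R' bd = bd.map (pvIncAt c) := by
  subst h
  exact pvIncCol_eq c bd

theorem pvColPhase_eq (goal : List (List Int)) (g0 : List Int) (hg0 : goal.getD 0 [] = g0)
    (cmp : Int) (R C : Nat) (hR : 0 < R) (a0 base : Int) :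
    pvColPhase goal cmp R C
        (a0, pvColsPartial g0 cmp C 0 base :: List.replicate (R - 1) (pvColsPartial g0 cmp C 0 0))
      = (a0 + ((List.range C).countP (fun c => !(g0.getD c 0 == cmp)) : Int),
         pvColsPartial g0 cmp C C base :: List.replicate (R - 1) (pvColsPartial g0 cmp C C 0)) := by
  unfold pvColPhase
  suffices h : ∀ k, k ≤ C →
      (List.range k).foldl
        (fun s c => if (goal.getD 0 []).getD c 0 == cmp then s else (s.1 + 1, pvIncCol c R s.2))
        (a0, pvColsPartial g0 cmp C 0 base :: List.replicate (R - 1) (pvColsPartial g0 cmp C 0 0))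
      = (a0 + ((List.range k).countP (fun c => !(g0.getD c 0 == cmp)) : Int),
         pvColsPartial g0 cmp C k base :: List.replicate (R - 1) (pvColsPartial g0 cmp C k 0)) by
    exact h C le_rfl
  intro k
  induction k with
  | zero => simp
  | succ n ih =>
    intro hk
    rw [List.range_succ, List.foldl_append, List.foldl_cons, List.foldl_nil, ih (by omega)]
    rw [hg0]
    by_cases hb : (g0.getD n 0 == cmp) = true
    · rw [if_pos hb, List.countP_append,
        pvColsPartial_stable g0 cmp C n base hb, pvColsPartial_stable g0 cmp C n 0 hb]
      simp [show (g0[n]?.getD 0 == cmp) = true from hb]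
    · rw [if_neg hb]
      have hb2 : (g0.getD n 0 == cmp) = false := by simpa using hb
      have hlen : (pvColsPartial g0 cmp C n base
          :: List.replicate (R - 1) (pvColsPartial g0 cmp C n 0)).length = R := by
        simp; omega
      rw [pvIncCol_eq' n R _ hlen, List.map_cons, List.map_replicate,
        pvIncAt_colsPartial g0 cmp C n base (by omega) hb2,
        pvIncAt_colsPartial g0 cmp C n 0 (by omega) hb2,
        List.countP_append, List.countP_singleton]
      simp only [hb2, Bool.not_false, if_pos]
      push_cast
      ring_nf

-- ---- row phase ----
def pvRowsPartial (goal : List (List Int)) (low : List Int) (n k : Nat) : List (List Int) :=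
  (List.range n).map (fun i =>
    if i < k ∧ ((goal.getD (i + 1) []).getD 0 0 == low.getD 0 0) = false
    then low.map (· + 1) else low)

theorem pvRowsPartial_getD (goal : List (List Int)) (low : List Int) (n k i : Nat)
    (hi : i < n) :
    (pvRowsPartial goal low n k).getD i []
      = if i < k ∧ ((goal.getD (i + 1) []).getD 0 0 == low.getD 0 0) = false
        then low.map (· + 1) else low := by
  simp [pvRowsPartial, List.getD_eq_getElem?_getD, hi]

theorem pvRowsPartial_zero (goal : List (List Int)) (low : List Int) (n : Nat) :
    pvRowsPartial goal low n 0 = List.replicate n low := by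
  unfold pvRowsPartial
  rw [show (List.replicate n low) = (List.range n).map (fun _ => low) from by
    rw [List.map_const', List.length_range]]
  apply List.map_congr_left
  intro i _
  simp

theorem pvRowsPartial_stable (goal : List (List Int)) (low : List Int) (n k : Nat)
    (hb : ((goal.getD (k + 1) []).getD 0 0 == low.getD 0 0) = true) :
    pvRowsPartial goal low n (k + 1) = pvRowsPartial goal low n k := by
  unfold pvRowsPartial
  apply List.map_congr_left
  intro i _
  by_cases hik : i < k
  · exact if_congr (by constructor <;> rintro ⟨h3, h4⟩ <;> exact ⟨by omega, h4⟩) rfl rfl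
  · by_cases hik1 : i < k + 1
    · have : i = k := by omega
      subst this
      rw [if_neg (by rintro ⟨-, hf⟩; rw [hb] at hf; cases hf),
        if_neg (by rintro ⟨h3, -⟩; omega)]
    · rw [if_neg (by rintro ⟨h3, -⟩; omega), if_neg (by rintro ⟨h3, -⟩; omega)]

theorem pvRowsPartial_set (goal : List (List Int)) (low : List Int) (n k : Nat) (hk : k < n)
    (hb : ((goal.getD (k + 1) []).getD 0 0 == low.getD 0 0) = false) :
    (pvRowsPartial goal low n k).set k (low.map (· + 1)) = pvRowsPartial goal low n (k + 1) := by
  unfold pvRowsPartial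
  apply List.ext_getElem
  · simp
  · intro i h1 h2
    simp only [List.length_set, List.length_map, List.length_range] at h1
    rw [List.getElem_set]
    by_cases hik : k = i
    · subst hik
      simp only [List.getElem_map, List.getElem_range]
      rw [if_pos trivial, if_pos ⟨Nat.lt_succ_self k, hb⟩]
    · rw [if_neg hik]
      simp only [List.getElem_map, List.getElem_range]
      exact if_congr (by constructor <;> rintro ⟨h3, h4⟩ <;> exact ⟨by omega, h4⟩) rfl rfl

theorem pvRowPhase_eq (goal : List (List Int)) (R C : Nat) (hR : 0 < R)
    (top low : List Int) (hlow : low.length = C) (a0 : Int) :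
    pvRowPhase goal R C (a0, top :: List.replicate (R - 1) low)
      = (a0 + ((List.range (R - 1)).countP
            (fun i => !((goal.getD (i + 1) []).getD 0 0 == low.getD 0 0)) : Int),
         top :: pvRowsPartial goal low (R - 1) (R - 1)) := by
  unfold pvRowPhase
  rw [← pvRowsPartial_zero goal low (R - 1)]
  suffices h : ∀ k, k ≤ R - 1 →
      (List.range k).foldl
        (fun s r1 =>
          if (goal.getD (r1 + 1) []).getD 0 0 == (s.2.getD (r1 + 1) []).getD 0 0 then s
          else (s.1 + 1, pvIncRowAt (r1 + 1) C s.2))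
        (a0, top :: pvRowsPartial goal low (R - 1) 0)
      = (a0 + ((List.range k).countP
            (fun i => !((goal.getD (i + 1) []).getD 0 0 == low.getD 0 0)) : Int),
         top :: pvRowsPartial goal low (R - 1) k) by
    exact h (R - 1) le_rfl
  intro k
  induction k with
  | zero => simp
  | succ n ih =>
    intro hk
    rw [List.range_succ, List.foldl_append, List.foldl_cons, List.foldl_nil, ih (by omega)]
    have hget : ((top :: pvRowsPartial goal low (R - 1) n).getD (n + 1) []) = low := by
      rw [List.getD_cons_succ, pvRowsPartial_getD goal low (R - 1) n n (by omega),
        if_neg (by rintro ⟨h3, -⟩; omega)]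
    rw [hget]
    by_cases hb : ((goal.getD (n + 1) []).getD 0 0 == low.getD 0 0) = true
    · rw [if_pos hb, List.countP_append, List.countP_singleton,
        show pvRowsPartial goal low (R - 1) (n + 1) = pvRowsPartial goal low (R - 1) n from
          pvRowsPartial_stable goal low (R - 1) n hb,
        if_neg (by rw [hb]; decide)]
      simp
    · have hb2 : ((goal.getD (n + 1) []).getD 0 0 == low.getD 0 0) = false := by simpa using hb
      rw [if_neg hb]
      have hlen2 : (top :: pvRowsPartial goal low (R - 1) n).length = (R - 1) + 1 := by
        simp [pvRowsPartial]
      rw [pvIncRowAt_eq (n + 1) C _ (by rw [hlen2]; omega) (by rw [hget, hlow]),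
        hget, List.set_cons_succ,
        show (pvRowsPartial goal low (R - 1) n).set n (low.map (· + 1))
            = pvRowsPartial goal low (R - 1) (n + 1) from
          pvRowsPartial_set goal low (R - 1) n (by omega) hb2,
        List.countP_append, List.countP_singleton]
      simp only [hb2, Bool.not_false, if_pos]
      push_cast
      ring_nf

-- ---- shapes and the check ----
theorem pv_all_congr {γ : Type} (l : List γ) (p q : γ → Bool) (h : ∀ x ∈ l, p x = q x) :
    l.all p = l.all q := by
  induction l with
  | nil => rfl
  | cons a l ih =>
    simp only [List.all_cons, h a (by simp), ih (fun x hx => h x (by simp [hx]))]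

theorem pv_map_add_one_cols (g0 : List Int) (cmp : Int) (C k : Nat) :
    (pvColsPartial g0 cmp C k 0).map (· + 1) = pvColsPartial g0 cmp C k 1 := by
  unfold pvColsPartial
  rw [List.map_map]
  apply List.map_congr_left
  intro c _
  simp only [Function.comp_apply]
  ring

-- canonical per-case count and feasibility
def pvCnt (goal : List (List Int)) (C n : Nat) (base : Int) : Int :=
  base + ((List.range C).countP (fun c => !((goal.getD 0 []).getD c 0 == base)) : Int)
    + ((List.range n).countP (fun i =>
        !((goal.getD (i + 1) []).getD 0 0
          == (pvColsPartial (goal.getD 0 []) base C C 0).getD 0 0)) : Int)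

def pvOk (goal : List (List Int)) (C n : Nat) (base : Int) : Bool :=
  ((List.range C).all (fun c => (goal.getD 0 []).getD c 0
      == PySem.Int.bxor base ((pvColsPartial (goal.getD 0 []) base C C 0).getD c 0)))
  && ((List.range n).all (fun i => (List.range C).all (fun c =>
      (goal.getD (i + 1) []).getD c 0
        == PySem.Int.bxor
            (if (goal.getD (i + 1) []).getD 0 0
                == (pvColsPartial (goal.getD 0 []) base C C 0).getD 0 0 then (0 : Int) else 1)
            ((pvColsPartial (goal.getD 0 []) base C C 0).getD c 0))))

theorem pv_cell_eq (x l base : Int) (hbase : base = 0 ∨ base = 1) (hl : l = 0 ∨ l = 1) :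
    (PySem.Int.mod (base + l) 2 == x) = (x == PySem.Int.bxor base l) := by
  have hm : PySem.Int.mod (base + l) 2 = PySem.Int.bxor base l := by
    rcases hbase with h | h <;> rcases hl with h2 | h2 <;> subst h <;> subst h2 <;> decide
  rw [hm]
  exact Bool.beq_comm

theorem pvCheck_eq (goal : List (List Int)) (C n : Nat) (base : Int)
    (hbase : base = 0 ∨ base = 1) :
    pvCheck (pvColsPartial (goal.getD 0 []) base C C base
        :: pvRowsPartial goal (pvColsPartial (goal.getD 0 []) base C C 0) n n) goal
      = pvOk goal C n base := by
  unfold pvCheck pvOk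
  simp only [List.length_cons, pvRowsPartial, List.length_map, List.length_range,
    List.getD_cons_zero, pvColsPartial_length]
  rw [List.range_succ_eq_map, List.all_cons, List.all_map]
  congr 1
  · -- row 0
    apply pv_all_congr
    intro c hc
    rw [List.mem_range] at hc
    rw [List.getD_cons_zero, pvColsPartial_getD _ _ _ _ _ c hc,
      pvColsPartial_getD _ _ _ _ _ c hc, zero_add]
    exact pv_cell_eq _ _ _ hbase (by split_ifs <;> simp)
  · -- rows 1..n
    apply pv_all_congr
    intro i hi
    rw [List.mem_range] at hi
    simp only [Function.comp_apply]
    have hrow : (pvColsPartial (goal.getD 0 []) base C C base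
        :: List.map (fun i =>
            if i < n ∧ ((goal.getD (i + 1) []).getD 0 0
                == (pvColsPartial (goal.getD 0 []) base C C 0).getD 0 0) = false
            then (pvColsPartial (goal.getD 0 []) base C C 0).map (· + 1)
            else pvColsPartial (goal.getD 0 []) base C C 0) (List.range n)).getD i.succ []
        = if ((goal.getD (i + 1) []).getD 0 0
              == (pvColsPartial (goal.getD 0 []) base C C 0).getD 0 0) = false
          then pvColsPartial (goal.getD 0 []) base C C 1
          else pvColsPartial (goal.getD 0 []) base C C 0 := by
      rw [Nat.succ_eq_add_one, List.getD_cons_succ,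
        show (List.map (fun i =>
            if i < n ∧ ((goal.getD (i + 1) []).getD 0 0
                == (pvColsPartial (goal.getD 0 []) base C C 0).getD 0 0) = false
            then (pvColsPartial (goal.getD 0 []) base C C 0).map (· + 1)
            else pvColsPartial (goal.getD 0 []) base C C 0) (List.range n))
          = pvRowsPartial goal (pvColsPartial (goal.getD 0 []) base C C 0) n n from rfl,
        pvRowsPartial_getD _ _ _ _ i hi, pv_map_add_one_cols]
      exact if_congr (and_iff_right hi) rfl rfl
    rw [hrow]
    by_cases hq : ((goal.getD (i + 1) []).getD 0 0
        == (pvColsPartial (goal.getD 0 []) base C C 0).getD 0 0) = true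
    · rw [if_neg (by rw [hq]; decide), if_pos hq]
      apply pv_all_congr
      intro c hc
      rw [List.mem_range] at hc
      rw [pvColsPartial_getD _ _ _ _ _ c hc]
      simp only [Nat.succ_eq_add_one, zero_add]
      have h5 := pv_cell_eq ((goal.getD (i + 1) []).getD c 0)
        (if c < C ∧ ((goal.getD 0 []).getD c 0 == base) = false then 1 else 0) 0
        (Or.inl rfl) (by split_ifs <;> simp)
      rw [zero_add] at h5
      exact h5
    · have hq2 : ((goal.getD (i + 1) []).getD 0 0
          == (pvColsPartial (goal.getD 0 []) base C C 0).getD 0 0) = false := by simpa using hq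
      rw [if_pos hq2, if_neg (by rw [hq2]; decide)]
      apply pv_all_congr
      intro c hc
      rw [List.mem_range] at hc
      rw [pvColsPartial_getD _ _ _ _ _ c hc, pvColsPartial_getD _ _ _ _ _ c hc, zero_add]
      exact pv_cell_eq _ _ _ (Or.inr rfl) (by split_ifs <;> simp)

theorem pv_replicate_cons (R : Nat) (hR : 0 < R) (x : List Int) :
    List.replicate R x = x :: List.replicate (R - 1) x := by
  have : R = (R - 1) + 1 := by omega
  rw [this, List.replicate_succ]
  simp

theorem pvCase0_eq (goal : List (List Int)) (R C : Nat) (hR : 0 < R) :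
    pvRowPhase goal R C (pvColPhase goal 0 R C (0, List.replicate R (List.replicate C 0)))
      = (pvCnt goal C (R - 1) 0,
         pvColsPartial (goal.getD 0 []) 0 C C 0
           :: pvRowsPartial goal (pvColsPartial (goal.getD 0 []) 0 C C 0) (R - 1) (R - 1)) := by
  have hz : List.replicate C (0 : Int) = pvColsPartial (goal.getD 0 []) 0 C 0 0 := by
    rw [pvColsPartial_zero, List.map_const', List.length_range]
  rw [pv_replicate_cons R hR, hz,
    pvColPhase_eq goal (goal.getD 0 []) rfl 0 R C hR 0 0,
    pvRowPhase_eq goal R C hR _ _ (pvColsPartial_length _ _ _ _ _) _]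
  unfold pvCnt
  norm_num

theorem pvCase1_eq (goal : List (List Int)) (R C : Nat) (hR : 0 < R) :
    pvRowPhase goal R C (pvColPhase goal 1 R C
        (1, pvIncRowAt 0 C (List.replicate R (List.replicate C 0))))
      = (pvCnt goal C (R - 1) 1,
         pvColsPartial (goal.getD 0 []) 1 C C 1
           :: pvRowsPartial goal (pvColsPartial (goal.getD 0 []) 1 C C 0) (R - 1) (R - 1)) := by
  have hz : List.replicate C (0 : Int) = pvColsPartial (goal.getD 0 []) 1 C 0 0 := by
    rw [pvColsPartial_zero, List.map_const', List.length_range]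
  have hone : (List.replicate C (0 : Int)).map (· + 1) = pvColsPartial (goal.getD 0 []) 1 C 0 1 := by
    rw [List.map_replicate, pvColsPartial_zero, List.map_const', List.length_range]
    norm_num
  have hinit : pvIncRowAt 0 C (List.replicate R (List.replicate C 0))
      = pvColsPartial (goal.getD 0 []) 1 C 0 1
        :: List.replicate (R - 1) (pvColsPartial (goal.getD 0 []) 1 C 0 0) := by
    rw [pvIncRowAt_eq 0 C _ (by simpa using hR) (by
        rw [pv_replicate_cons R hR]; simp),
      pv_replicate_cons R hR]
    simp only [List.getD_cons_zero, List.set_cons_zero]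
    rw [hone, hz]
  rw [hinit, pvColPhase_eq goal (goal.getD 0 []) rfl 1 R C hR 1 1,
    pvRowPhase_eq goal R C hR _ _ (pvColsPartial_length _ _ _ _ _) _]
  rfl

theorem pvA_eq (b t : List (List Int)) (hb : b ≠ []) :
    solution b t
      = (if (if pvOk ((List.range b.length).map (fun r => (List.range (b.headD []).length).map
              (fun c => PySem.Int.bxor ((b.getD r []).getD c 0) ((t.getD r []).getD c 0))))
            (b.headD []).length (b.length - 1) 1
           then min (pvCnt ((List.range b.length).map (fun r => (List.range (b.headD []).length).map
              (fun c => PySem.Int.bxor ((b.getD r []).getD c 0) ((t.getD r []).getD c 0))))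
            (b.headD []).length (b.length - 1) 1)
            (if pvOk ((List.range b.length).map (fun r => (List.range (b.headD []).length).map
                (fun c => PySem.Int.bxor ((b.getD r []).getD c 0) ((t.getD r []).getD c 0))))
              (b.headD []).length (b.length - 1) 0
             then pvCnt ((List.range b.length).map (fun r => (List.range (b.headD []).length).map
                (fun c => PySem.Int.bxor ((b.getD r []).getD c 0) ((t.getD r []).getD c 0))))
              (b.headD []).length (b.length - 1) 0 else 1000000000)
           else (if pvOk ((List.range b.length).map (fun r => (List.range (b.headD []).length).map
                (fun c => PySem.Int.bxor ((b.getD r []).getD c 0) ((t.getD r []).getD c 0))))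
              (b.headD []).length (b.length - 1) 0
             then pvCnt ((List.range b.length).map (fun r => (List.range (b.headD []).length).map
                (fun c => PySem.Int.bxor ((b.getD r []).getD c 0) ((t.getD r []).getD c 0))))
              (b.headD []).length (b.length - 1) 0 else 1000000000)) == 1000000000
         then -1
         else (if pvOk ((List.range b.length).map (fun r => (List.range (b.headD []).length).map
              (fun c => PySem.Int.bxor ((b.getD r []).getD c 0) ((t.getD r []).getD c 0))))
            (b.headD []).length (b.length - 1) 1
           then min (pvCnt ((List.range b.length).map (fun r => (List.range (b.headD []).length).map
              (fun c => PySem.Int.bxor ((b.getD r []).getD c 0) ((t.getD r []).getD c 0))))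
            (b.headD []).length (b.length - 1) 1)
            (if pvOk ((List.range b.length).map (fun r => (List.range (b.headD []).length).map
                (fun c => PySem.Int.bxor ((b.getD r []).getD c 0) ((t.getD r []).getD c 0))))
              (b.headD []).length (b.length - 1) 0
             then pvCnt ((List.range b.length).map (fun r => (List.range (b.headD []).length).map
                (fun c => PySem.Int.bxor ((b.getD r []).getD c 0) ((t.getD r []).getD c 0))))
              (b.headD []).length (b.length - 1) 0 else 1000000000)
           else (if pvOk ((List.range b.length).map (fun r => (List.range (b.headD []).length).map
                (fun c => PySem.Int.bxor ((b.getD r []).getD c 0) ((t.getD r []).getD c 0))))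
              (b.headD []).length (b.length - 1) 0
             then pvCnt ((List.range b.length).map (fun r => (List.range (b.headD []).length).map
                (fun c => PySem.Int.bxor ((b.getD r []).getD c 0) ((t.getD r []).getD c 0))))
              (b.headD []).length (b.length - 1) 0 else 1000000000))) := by
  have hR : 0 < b.length := List.length_pos_iff.mpr hb
  unfold solution
  dsimp only
  have hGE : (List.range b.length).map (fun r => (List.range (b.headD []).length).map (pvE b t r))
      = (List.range b.length).map (fun r => (List.range (b.headD []).length).map
          (fun c => PySem.Int.bxor ((b.getD r []).getD c 0) ((t.getD r []).getD c 0))) := rfl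
  rw [pvGoalLoop_eq b t b.length (b.headD []).length, hGE]
  rw [pvCase0_eq _ b.length (b.headD []).length hR, pvCase1_eq _ b.length (b.headD []).length hR]
  dsimp only
  rw [pvCheck_eq _ (b.headD []).length (b.length - 1) 0 (Or.inl rfl),
    pvCheck_eq _ (b.headD []).length (b.length - 1) 1 (Or.inr rfl)]

theorem pvCnt_bounds (goal : List (List Int)) (C n : Nat) (base : Int)
    (hbase : base = 0 ∨ base = 1) :
    base ≤ pvCnt goal C n base ∧ pvCnt goal C n base ≤ base + C + n := by
  unfold pvCnt
  have h1 : (List.range C).countP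
      (fun c => !((goal.getD 0 []).getD c 0 == base)) ≤ C := by
    calc (List.range C).countP (fun c => !((goal.getD 0 []).getD c 0 == base))
        ≤ (List.range C).length := List.countP_le_length
      _ = C := List.length_range
  have h2 : (List.range n).countP
      (fun i => !((goal.getD (i + 1) []).getD 0 0
        == (pvColsPartial (goal.getD 0 []) base C C 0).getD 0 0)) ≤ n := by
    calc (List.range n).countP (fun i => !((goal.getD (i + 1) []).getD 0 0
          == (pvColsPartial (goal.getD 0 []) base C C 0).getD 0 0))
        ≤ (List.range n).length := List.countP_le_length
      _ = n := List.length_range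
  constructor <;> omega

-- ================= B-side lemmas =================

theorem pv_beq_map (f g : Nat → Int) (L : List Nat) :
    ((L.map f) == (L.map g)) = L.all (fun c => f c == g c) := by
  induction L with
  | nil => rfl
  | cons a L ih => simp only [List.map_cons, List.all_cons, List.cons_beq_cons, ih]

theorem pv_any_not (xs : List Int) :
    xs.any (fun x => !(x == 0) && !(x == 1)) = !(xs.all (fun x => x == 0 || x == 1)) := by
  induction xs with
  | nil => rfl
  | cons a l ih => simp only [List.any_cons, List.all_cons, ih, Bool.not_and, Bool.not_or]

theorem pvFoldNone (p q : Nat → Bool) (L : List Nat) :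
    L.foldl (fun st r =>
      st.bind (fun m =>
        if p r then some (m.1 + 1, m.2) else if q r then some (m.1, m.2 + 1) else none))
      (none : Option (Int × Int)) = none := by
  induction L with
  | nil => rfl
  | cons a L ih => simpa using ih

theorem pvFoldOpt (p q : Nat → Bool) (L : List Nat) :
    ∀ (m : Int × Int),
    L.foldl (fun st r =>
      st.bind (fun m =>
        if p r then some (m.1 + 1, m.2) else if q r then some (m.1, m.2 + 1) else none))
      (some m)
    = if L.all (fun r => p r || q r)
      then some (m.1 + (L.countP p : Int), m.2 + (L.countP (fun r => !p r && q r) : Int))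
      else none := by
  induction L with
  | nil => intro m; simp
  | cons a L ih =>
    intro m
    rw [List.foldl_cons, List.all_cons, List.countP_cons, List.countP_cons]
    by_cases hp : p a = true
    · rw [show ((some m).bind (fun mm =>
          if p a then some (mm.1 + 1, mm.2) else if q a then some (mm.1, mm.2 + 1) else none))
          = some (m.1 + 1, m.2) from by simp [hp]]
      rw [ih]
      by_cases hall : L.all (fun r => p r || q r) = true
      · rw [if_pos hall, if_pos (by simp [hp, hall])]
        simp only [hp, Bool.not_true, Bool.false_and, if_true, Option.some.injEq, Prod.mk.injEq]
        constructor <;> push_cast <;> ring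
      · rw [if_neg hall, if_neg (by simp [hall])]
    · have hp' : p a = false := by simpa using hp
      by_cases hq : q a = true
      · rw [show ((some m).bind (fun mm =>
            if p a then some (mm.1 + 1, mm.2) else if q a then some (mm.1, mm.2 + 1) else none))
            = some (m.1, m.2 + 1) from by simp [hp', hq]]
        rw [ih]
        by_cases hall : L.all (fun r => p r || q r) = true
        · rw [if_pos hall, if_pos (by simp [hq, hall])]
          simp only [hp', hq, Bool.not_false, Bool.true_and, if_true, Option.some.injEq,
            Prod.mk.injEq]
          constructor <;> push_cast <;> ring
        · rw [if_neg hall, if_neg (by simp [hall])]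
      · have hq' : q a = false := by simpa using hq
        rw [show ((some m).bind (fun mm =>
            if p a then some (mm.1 + 1, mm.2) else if q a then some (mm.1, mm.2 + 1) else none))
            = none from by simp [hp', hq']]
        rw [pvFoldNone, if_neg (by simp [hp', hq'])]

theorem pvDiffRow_getD (b t : List (List Int)) (C r c : Nat) (hc : c < C) :
    (pvDiffRow b t C r).getD c 0 = pvE b t r c := by
  simp [pvDiffRow, List.getD_eq_getElem?_getD, hc, pvE]

theorem pvG_getD (b t : List (List Int)) (r : Nat) (hr : r < b.length) :
    (((List.range b.length).map (fun r => (List.range (b.headD []).length).map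
        (fun c => PySem.Int.bxor ((b.getD r []).getD c 0) ((t.getD r []).getD c 0)))).getD r [])
      = pvDiffRow b t (b.headD []).length r := by
  simp [List.getD_eq_getElem?_getD, hr, pvDiffRow]

-- proof-side predicates: row r equals row 0 / equals its complement; binary row 0; all classified
def pvP (b t : List (List Int)) (C r : Nat) : Bool := pvDiffRow b t C r == pvDiffRow b t C 0
def pvQ (b t : List (List Int)) (C r : Nat) : Bool :=
  pvDiffRow b t C r == (pvDiffRow b t C 0).map (fun x => PySem.Int.bxor x 1)
def pvBinB (b t : List (List Int)) (C : Nat) : Bool :=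
  (pvDiffRow b t C 0).all (fun x => x == 0 || x == 1)
def pvClsB (b t : List (List Int)) (C n : Nat) : Bool :=
  (List.range n).all (fun i => pvP b t C (i + 1) || pvQ b t C (i + 1))

theorem pvBinB_eq (b t : List (List Int)) (C : Nat) :
    pvBinB b t C = (List.range C).all (fun c => pvE b t 0 c == 0 || pvE b t 0 c == 1) := by
  unfold pvBinB pvDiffRow
  rw [List.all_map]
  rfl

theorem pvBinB_elim (b t : List (List Int)) (C : Nat) (h : pvBinB b t C = true) :
    ∀ c, c < C → pvE b t 0 c = 0 ∨ pvE b t 0 c = 1 := by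
  rw [pvBinB_eq] at h
  intro c hc
  have := List.all_eq_true.mp h c (List.mem_range.mpr hc)
  rcases Bool.or_eq_true_iff.mp this with h1 | h1
  · exact Or.inl (by simpa using h1)
  · exact Or.inr (by simpa using h1)

theorem pvAltB_eq (b t : List (List Int)) :
    solution_alt b t =
      if pvBinB b t (b.headD []).length then
        (if pvClsB b t (b.headD []).length (b.length - 1) then
          min ((pvDiffRow b t (b.headD []).length 0).sum
                + ((List.range (b.length - 1)).countP
                    (fun i => !pvP b t (b.headD []).length (i + 1)
                      && pvQ b t (b.headD []).length (i + 1)) : Int))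
              ((1 : Int) + (((b.headD []).length : Int) - (pvDiffRow b t (b.headD []).length 0).sum)
                + ((List.range (b.length - 1)).countP
                    (fun i => pvP b t (b.headD []).length (i + 1)) : Int))
         else -1)
      else -1 := by
  unfold solution_alt
  dsimp only
  rw [pv_any_not]
  cases hbin : pvBinB b t (b.headD []).length
  · rw [show ((pvDiffRow b t (b.headD []).length 0).all fun x => x == 0 || x == 1) = false from hbin]
    rfl
  · rw [show ((pvDiffRow b t (b.headD []).length 0).all fun x => x == 0 || x == 1) = true from hbin]
    rw [pvFoldOpt
      (fun r1 => pvDiffRow b t (b.headD []).length (r1 + 1) == pvDiffRow b t (b.headD []).length 0)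
      (fun r1 => pvDiffRow b t (b.headD []).length (r1 + 1)
        == (pvDiffRow b t (b.headD []).length 0).map (fun x => PySem.Int.bxor x 1))
      (List.range (b.length - 1)) (0, 0)]
    cases hcls : pvClsB b t (b.headD []).length (b.length - 1)
    · rw [show ((List.range (b.length - 1)).all fun r1 =>
          (pvDiffRow b t (b.headD []).length (r1 + 1) == pvDiffRow b t (b.headD []).length 0)
          || (pvDiffRow b t (b.headD []).length (r1 + 1)
              == (pvDiffRow b t (b.headD []).length 0).map (fun x => PySem.Int.bxor x 1))) = false
        from hcls]
      rfl
    · rw [show ((List.range (b.length - 1)).all fun r1 =>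
          (pvDiffRow b t (b.headD []).length (r1 + 1) == pvDiffRow b t (b.headD []).length 0)
          || (pvDiffRow b t (b.headD []).length (r1 + 1)
              == (pvDiffRow b t (b.headD []).length 0).map (fun x => PySem.Int.bxor x 1))) = true
        from hcls]
      simp [pvP, pvQ]

-- entry c of A's column-flip vector, as a function of the goal entry
theorem pv_cols_entry (b t : List (List Int)) (C : Nat) (base : Int) (c : Nat) (hc : c < C) :
    (pvColsPartial (pvDiffRow b t C 0) base C C 0).getD c 0
      = if pvE b t 0 c == base then (0 : Int) else 1 := by
  rw [pvColsPartial_getD _ _ _ _ _ c hc, zero_add, pvDiffRow_getD _ _ _ _ _ hc]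
  by_cases h : (pvE b t 0 c == base) = true
  · rw [if_pos h, if_neg (by rintro ⟨-, hf⟩; rw [h] at hf; cases hf)]
  · have h' : (pvE b t 0 c == base) = false := by simpa using h
    rw [if_pos ⟨hc, h'⟩, if_neg (show ¬ (pvE b t 0 c == base) = true from h)]

theorem pv_firstcell (x base : Int) (hbase : base = 0 ∨ base = 1) :
    (x == PySem.Int.bxor base (if x == base then (0 : Int) else 1)) = (x == 0 || x == 1) := by
  rcases hbase with rfl | rfl
  · by_cases h : (x == 0) = true
    · have hx : x = 0 := by simpa using h
      subst hx; decide
    · have h' : (x == 0) = false := by simpa using h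
      rw [if_neg (by simp [h']), show PySem.Int.bxor 0 1 = 1 from by decide, h']
      simp
  · by_cases h : (x == 1) = true
    · have hx : x = 1 := by simpa using h
      subst hx; decide
    · have h' : (x == 1) = false := by simpa using h
      rw [if_neg (by simp [h']), show PySem.Int.bxor 1 1 = 0 from by decide, h']
      simp

theorem pv_all_head (f g : Nat → Int) (C : Nat) (h0C : 0 < C)
    (h : ((List.range C).map f == (List.range C).map g) = true) : f 0 = g 0 := by
  have heq : (List.range C).map f = (List.range C).map g := by
    exact eq_of_beq h
  have h2 := congrArg (fun l => l.getD 0 (0 : Int)) heq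
  simpa [List.getD_eq_getElem?_getD, h0C] using h2

theorem pv_rowcheck (f g : Nat → Int) (C : Nat) (h0C : 0 < C) (base : Int)
    (hbase : base = 0 ∨ base = 1) (hbin : ∀ c, c < C → g c = 0 ∨ g c = 1) :
    ((List.range C).all (fun c => f c == PySem.Int.bxor
        (if f 0 == (if g 0 == base then (0 : Int) else 1) then (0 : Int) else 1)
        (if g c == base then (0 : Int) else 1)))
    = (((List.range C).map f == (List.range C).map g)
        || ((List.range C).map f == ((List.range C).map g).map (fun x => PySem.Int.bxor x 1))) := by
  rw [List.map_map,
    pv_beq_map f g (List.range C),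
    pv_beq_map f ((fun x => PySem.Int.bxor x 1) ∘ g) (List.range C)]
  simp only [Function.comp_apply]
  have hg0 := hbin 0 h0C
  rcases hbase with rfl | rfl
  · have hcol : ∀ c, c < C → (if g c == (0 : Int) then (0 : Int) else 1) = g c := by
      intro c hc
      rcases hbin c hc with h | h <;> rw [h] <;> decide
    rw [hcol 0 h0C]
    by_cases hf : (f 0 == g 0) = true
    · have hfe : f 0 = g 0 := by simpa using hf
      rw [if_pos hf]
      have hall : ((List.range C).all (fun c => f c == PySem.Int.bxor 0
            (if g c == (0 : Int) then (0 : Int) else 1)))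
          = (List.range C).all (fun c => f c == g c) := by
        apply pv_all_congr
        intro c hc
        rw [List.mem_range] at hc
        rw [hcol c hc]
        rcases hbin c hc with h | h <;> rw [h]
        · rw [show PySem.Int.bxor 0 0 = 0 from by decide]
        · rw [show PySem.Int.bxor 0 1 = 1 from by decide]
      rw [hall]
      cases hQv : ((List.range C).all (fun c => f c == PySem.Int.bxor (g c) 1))
      · rw [Bool.or_false]
      · have h0 := List.all_eq_true.mp hQv 0 (List.mem_range.mpr h0C)
        have hx : f 0 = PySem.Int.bxor (g 0) 1 := by simpa using h0
        exfalso
        rcases hg0 with h | h <;> rw [h] at hfe hx <;> rw [hfe] at hx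
        · exact absurd hx (by decide)
        · exact absurd hx (by decide)
    · rw [if_neg hf]
      have hf' : (f 0 == g 0) = false := by simpa using hf
      have hall : ((List.range C).all (fun c => f c == PySem.Int.bxor 1
            (if g c == (0 : Int) then (0 : Int) else 1)))
          = (List.range C).all (fun c => f c == PySem.Int.bxor (g c) 1) := by
        apply pv_all_congr
        intro c hc
        rw [List.mem_range] at hc
        rw [hcol c hc]
        rcases hbin c hc with h | h <;> rw [h]
        rw [show PySem.Int.bxor 1 0 = PySem.Int.bxor 0 1 from by decide]
      rw [hall]
      cases hPv : ((List.range C).all (fun c => f c == g c))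
      · rw [Bool.false_or]
      · have h0 := List.all_eq_true.mp hPv 0 (List.mem_range.mpr h0C)
        have hx : f 0 = g 0 := by simpa using h0
        exact absurd (by simpa using hx : (f 0 == g 0) = true) (by simp [hf'])
  · have hcol : ∀ c, c < C → (if g c == (1 : Int) then (0 : Int) else 1)
        = PySem.Int.bxor (g c) 1 := by
      intro c hc
      rcases hbin c hc with h | h <;> rw [h] <;> decide
    rw [hcol 0 h0C]
    by_cases hf : (f 0 == PySem.Int.bxor (g 0) 1) = true
    · have hfe : f 0 = PySem.Int.bxor (g 0) 1 := by simpa using hf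
      rw [if_pos hf]
      have hall : ((List.range C).all (fun c => f c == PySem.Int.bxor 0
            (if g c == (1 : Int) then (0 : Int) else 1)))
          = (List.range C).all (fun c => f c == PySem.Int.bxor (g c) 1) := by
        apply pv_all_congr
        intro c hc
        rw [List.mem_range] at hc
        rw [hcol c hc]
        rcases hbin c hc with h | h <;> rw [h]
        · rw [show PySem.Int.bxor 0 (PySem.Int.bxor 0 1) = PySem.Int.bxor 0 1 from by decide]
        · rw [show PySem.Int.bxor 0 (PySem.Int.bxor 1 1) = PySem.Int.bxor 1 1 from by decide]
      rw [hall]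
      cases hPv : ((List.range C).all (fun c => f c == g c))
      · rw [Bool.false_or]
      · have h0 := List.all_eq_true.mp hPv 0 (List.mem_range.mpr h0C)
        have hx : f 0 = g 0 := by simpa using h0
        exfalso
        rcases hg0 with h | h <;> rw [h] at hfe hx <;> rw [hx] at hfe
        · exact absurd hfe (by decide)
        · exact absurd hfe (by decide)
    · rw [if_neg hf]
      have hall : ((List.range C).all (fun c => f c == PySem.Int.bxor 1
            (if g c == (1 : Int) then (0 : Int) else 1)))
          = (List.range C).all (fun c => f c == g c) := by
        apply pv_all_congr
        intro c hc
        rw [List.mem_range] at hc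
        rw [hcol c hc]
        rcases hbin c hc with h | h <;> rw [h]
        · rw [show PySem.Int.bxor 1 (PySem.Int.bxor 0 1) = 0 from by decide]
        · rw [show PySem.Int.bxor 1 (PySem.Int.bxor 1 1) = 1 from by decide]
      rw [hall]
      cases hQv : ((List.range C).all (fun c => f c == PySem.Int.bxor (g c) 1))
      · rw [Bool.or_false]
      · have h0 := List.all_eq_true.mp hQv 0 (List.mem_range.mpr h0C)
        have hx : f 0 = PySem.Int.bxor (g 0) 1 := by simpa using h0
        exact absurd (by simpa using hx : (f 0 == PySem.Int.bxor (g 0) 1) = true) hf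

theorem pv_countP_congr {g : Type} (l : List g) (p q : g → Bool) (h : ∀ x ∈ l, p x = q x) :
    l.countP p = l.countP q :=
  List.countP_congr (fun x hx => by rw [h x hx])

-- the per-row check of A's verification pass, written over goal entries
def pvChk (b t : List (List Int)) (C i : Nat) (base : Int) : Bool :=
  (List.range C).all (fun c => pvE b t (i + 1) c == PySem.Int.bxor
      (if pvE b t (i + 1) 0 == (if pvE b t 0 0 == base then (0 : Int) else 1)
       then (0 : Int) else 1)
      (if pvE b t 0 c == base then (0 : Int) else 1))

theorem pvOk_eq (b t : List (List Int)) (hb : b ≠ [])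
    (hsh : b.length ≤ 1 ∨ 1 ≤ (b.headD []).length) (base : Int) (hbase : base = 0 ∨ base = 1) :
    pvOk ((List.range b.length).map (fun r => (List.range (b.headD []).length).map (fun c => PySem.Int.bxor ((b.getD r []).getD c 0) ((t.getD r []).getD c 0))))
      (b.headD []).length (b.length - 1) base
    = (pvBinB b t (b.headD []).length && pvClsB b t (b.headD []).length (b.length - 1)) := by
  have hR : 0 < b.length := List.length_pos_iff.mpr hb
  unfold pvOk
  simp only [pvG_getD b t 0 hR]
  have h1 : ((List.range (b.headD []).length).all (fun c =>
      (pvDiffRow b t (b.headD []).length 0).getD c 0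
        == PySem.Int.bxor base ((pvColsPartial (pvDiffRow b t (b.headD []).length 0) base
            (b.headD []).length (b.headD []).length 0).getD c 0)))
      = pvBinB b t (b.headD []).length := by
    rw [pvBinB_eq]
    apply pv_all_congr
    intro c hc
    rw [List.mem_range] at hc
    rw [pvDiffRow_getD b t _ 0 c hc, pv_cols_entry b t _ base c hc]
    exact pv_firstcell (pvE b t 0 c) base hbase
  rw [h1]
  cases hbin : pvBinB b t (b.headD []).length
  · rw [Bool.false_and, Bool.false_and]
  · rw [Bool.true_and, Bool.true_and]
    unfold pvClsB
    apply pv_all_congr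
    intro i hi
    rw [List.mem_range] at hi
    have h0C : 0 < (b.headD []).length := by
      rcases hsh with h | h
      · exact absurd hi (by omega)
      · exact h
    have hiR : i + 1 < b.length := by omega
    simp only [pvG_getD b t (i + 1) hiR]
    rw [pvDiffRow_getD b t _ (i + 1) 0 h0C, pv_cols_entry b t _ base 0 h0C]
    have h2 : ((List.range (b.headD []).length).all (fun c =>
        (pvDiffRow b t (b.headD []).length (i + 1)).getD c 0
          == PySem.Int.bxor
              (if pvE b t (i + 1) 0 == (if pvE b t 0 0 == base then (0 : Int) else 1)
               then (0 : Int) else 1)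
              ((pvColsPartial (pvDiffRow b t (b.headD []).length 0) base
                  (b.headD []).length (b.headD []).length 0).getD c 0)))
        = pvChk b t (b.headD []).length i base := by
      apply pv_all_congr
      intro c hc
      rw [List.mem_range] at hc
      rw [pvDiffRow_getD b t _ (i + 1) c hc, pv_cols_entry b t _ base c hc]
    rw [h2]
    unfold pvChk
    rw [pv_rowcheck (pvE b t (i + 1)) (pvE b t 0) (b.headD []).length h0C base hbase
      (pvBinB_elim b t _ hbin)]
    rfl

theorem pv_sum_binary (g : Nat → Int) :
    ∀ C : Nat, (∀ c, c < C → g c = 0 ∨ g c = 1) →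
    ((List.range C).map g).sum = ((List.range C).countP (fun c => !(g c == 0)) : Int) := by
  intro C
  induction C with
  | zero => intro _; simp
  | succ n ih =>
    intro h
    rw [List.range_succ, List.map_append, List.sum_append, List.countP_append,
      ih (fun c hc => h c (by omega))]
    rcases h n (by omega) with hg | hg <;> simp [hg]

theorem pv_count_one (g : Nat → Int) :
    ∀ C : Nat, (∀ c, c < C → g c = 0 ∨ g c = 1) →
    ((List.range C).countP (fun c => !(g c == 1)) : Int)
      = (C : Int) - ((List.range C).countP (fun c => !(g c == 0)) : Int) := by
  intro C
  induction C with
  | zero => intro _; simp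
  | succ n ih =>
    intro h
    rw [List.range_succ, List.countP_append, List.countP_append,
      Nat.cast_add, ih (fun c hc => h c (by omega))]
    rcases h n (by omega) with hg | hg
    · simp [hg]
      ring
    · simp [hg]

theorem pvP_head (b t : List (List Int)) (C r : Nat) (h0C : 0 < C) (h : pvP b t C r = true) :
    pvE b t r 0 = pvE b t 0 0 :=
  pv_all_head (pvE b t r) (pvE b t 0) C h0C h

theorem pvQ_head (b t : List (List Int)) (C r : Nat) (h0C : 0 < C) (h : pvQ b t C r = true) :
    pvE b t r 0 = PySem.Int.bxor (pvE b t 0 0) 1 := by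
  have h2 : ((List.range C).map (pvE b t r)
      == (List.range C).map ((fun x => PySem.Int.bxor x 1) ∘ pvE b t 0)) = true := by
    have h3 := h
    unfold pvQ pvDiffRow at h3
    rw [List.map_map] at h3
    exact h3
  exact pv_all_head _ _ C h0C h2

theorem pv_row_pred0 (b t : List (List Int)) (C : Nat) (h0C : 0 < C)
    (hbin : ∀ c, c < C → pvE b t 0 c = 0 ∨ pvE b t 0 c = 1)
    (i : Nat) (hPQ : (pvP b t C (i + 1) || pvQ b t C (i + 1)) = true) :
    (!(pvE b t (i + 1) 0 == pvE b t 0 0))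
      = (!pvP b t C (i + 1) && pvQ b t C (i + 1)) := by
  cases hP : pvP b t C (i + 1)
  · have hQ : pvQ b t C (i + 1) = true := by
      rcases Bool.or_eq_true_iff.mp hPQ with h | h
      · rw [hP] at h; cases h
      · exact h
    rw [pvQ_head b t C (i + 1) h0C hQ, hQ]
    rcases hbin 0 h0C with h | h <;> rw [h] <;> decide
  · rw [pvP_head b t C (i + 1) h0C hP]
    simp

theorem pv_row_pred1 (b t : List (List Int)) (C : Nat) (h0C : 0 < C)
    (hbin : ∀ c, c < C → pvE b t 0 c = 0 ∨ pvE b t 0 c = 1)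
    (i : Nat) (hPQ : (pvP b t C (i + 1) || pvQ b t C (i + 1)) = true) :
    (!(pvE b t (i + 1) 0 == PySem.Int.bxor (pvE b t 0 0) 1)) = pvP b t C (i + 1) := by
  cases hP : pvP b t C (i + 1)
  · have hQ : pvQ b t C (i + 1) = true := by
      rcases Bool.or_eq_true_iff.mp hPQ with h | h
      · rw [hP] at h; cases h
      · exact h
    rw [pvQ_head b t C (i + 1) h0C hQ]
    simp
  · rw [pvP_head b t C (i + 1) h0C hP]
    rcases hbin 0 h0C with h | h <;> rw [h] <;> decide

theorem pvCnt_eq0 (b t : List (List Int)) (hb : b ≠ [])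
    (hsh : b.length ≤ 1 ∨ 1 ≤ (b.headD []).length)
    (hbin : pvBinB b t (b.headD []).length = true)
    (hcls : pvClsB b t (b.headD []).length (b.length - 1) = true) :
    pvCnt ((List.range b.length).map (fun r => (List.range (b.headD []).length).map (fun c => PySem.Int.bxor ((b.getD r []).getD c 0) ((t.getD r []).getD c 0))))
      (b.headD []).length (b.length - 1) 0
    = (pvDiffRow b t (b.headD []).length 0).sum
      + ((List.range (b.length - 1)).countP
          (fun i => !pvP b t (b.headD []).length (i + 1)
            && pvQ b t (b.headD []).length (i + 1)) : Int) := by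
  have hR : 0 < b.length := List.length_pos_iff.mpr hb
  have hbin' := pvBinB_elim b t (b.headD []).length hbin
  unfold pvCnt
  simp only [pvG_getD b t 0 hR]
  have hX : (List.range (b.headD []).length).countP
        (fun c => !((pvDiffRow b t (b.headD []).length 0).getD c 0 == 0))
      = (List.range (b.headD []).length).countP (fun c => !(pvE b t 0 c == 0)) := by
    apply pv_countP_congr
    intro c hc
    rw [List.mem_range] at hc
    rw [pvDiffRow_getD b t _ 0 c hc]
  have hY : (List.range (b.length - 1)).countP
        (fun i => !((((List.range b.length).map (fun r => (List.range (b.headD []).length).map (fun c => PySem.Int.bxor ((b.getD r []).getD c 0) ((t.getD r []).getD c 0)))).getD (i + 1) []).getD 0 0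
          == (pvColsPartial (pvDiffRow b t (b.headD []).length 0) 0
              (b.headD []).length (b.headD []).length 0).getD 0 0))
      = (List.range (b.length - 1)).countP
          (fun i => !pvP b t (b.headD []).length (i + 1)
            && pvQ b t (b.headD []).length (i + 1)) := by
    apply pv_countP_congr
    intro i hi
    rw [List.mem_range] at hi
    have h0C : 0 < (b.headD []).length := by
      rcases hsh with h | h
      · exact absurd hi (by omega)
      · exact h
    rw [pvG_getD b t (i + 1) (by omega), pvDiffRow_getD b t _ (i + 1) 0 h0C,
      pv_cols_entry b t _ 0 0 h0C]
    rw [show (if pvE b t 0 0 == (0 : Int) then (0 : Int) else 1) = pvE b t 0 0 from by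
      rcases hbin' 0 h0C with h | h <;> rw [h] <;> decide]
    exact pv_row_pred0 b t _ h0C hbin' i (List.all_eq_true.mp hcls i (List.mem_range.mpr hi))
  rw [hX, hY, ← pv_sum_binary (pvE b t 0) (b.headD []).length hbin', zero_add]
  rfl

theorem pvCnt_eq1 (b t : List (List Int)) (hb : b ≠ [])
    (hsh : b.length ≤ 1 ∨ 1 ≤ (b.headD []).length)
    (hbin : pvBinB b t (b.headD []).length = true)
    (hcls : pvClsB b t (b.headD []).length (b.length - 1) = true) :
    pvCnt ((List.range b.length).map (fun r => (List.range (b.headD []).length).map (fun c => PySem.Int.bxor ((b.getD r []).getD c 0) ((t.getD r []).getD c 0))))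
      (b.headD []).length (b.length - 1) 1
    = 1 + (((b.headD []).length : Int) - (pvDiffRow b t (b.headD []).length 0).sum)
      + ((List.range (b.length - 1)).countP
          (fun i => pvP b t (b.headD []).length (i + 1)) : Int) := by
  have hR : 0 < b.length := List.length_pos_iff.mpr hb
  have hbin' := pvBinB_elim b t (b.headD []).length hbin
  unfold pvCnt
  simp only [pvG_getD b t 0 hR]
  have hX : ((List.range (b.headD []).length).countP
        (fun c => !((pvDiffRow b t (b.headD []).length 0).getD c 0 == 1)) : Int)
      = (((b.headD []).length : Int) - (pvDiffRow b t (b.headD []).length 0).sum) := by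
    rw [show (List.range (b.headD []).length).countP
          (fun c => !((pvDiffRow b t (b.headD []).length 0).getD c 0 == 1))
        = (List.range (b.headD []).length).countP (fun c => !(pvE b t 0 c == 1)) from by
      apply pv_countP_congr
      intro c hc
      rw [List.mem_range] at hc
      rw [pvDiffRow_getD b t _ 0 c hc]]
    rw [pv_count_one (pvE b t 0) (b.headD []).length hbin',
      ← pv_sum_binary (pvE b t 0) (b.headD []).length hbin']
    rfl
  have hY : (List.range (b.length - 1)).countP
        (fun i => !((((List.range b.length).map (fun r => (List.range (b.headD []).length).map (fun c => PySem.Int.bxor ((b.getD r []).getD c 0) ((t.getD r []).getD c 0)))).getD (i + 1) []).getD 0 0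
          == (pvColsPartial (pvDiffRow b t (b.headD []).length 0) 1
              (b.headD []).length (b.headD []).length 0).getD 0 0))
      = (List.range (b.length - 1)).countP
          (fun i => pvP b t (b.headD []).length (i + 1)) := by
    apply pv_countP_congr
    intro i hi
    rw [List.mem_range] at hi
    have h0C : 0 < (b.headD []).length := by
      rcases hsh with h | h
      · exact absurd hi (by omega)
      · exact h
    rw [pvG_getD b t (i + 1) (by omega), pvDiffRow_getD b t _ (i + 1) 0 h0C,
      pv_cols_entry b t _ 1 0 h0C]
    rw [show (if pvE b t 0 0 == (1 : Int) then (0 : Int) else 1)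
          = PySem.Int.bxor (pvE b t 0 0) 1 from by
      rcases hbin' 0 h0C with h | h <;> rw [h] <;> decide]
    exact pv_row_pred1 b t _ h0C hbin' i (List.all_eq_true.mp hcls i (List.mem_range.mpr hi))
  rw [hY]
  rw [show ((List.range (b.headD []).length).countP
        (fun c => !((pvDiffRow b t (b.headD []).length 0).getD c 0 == 1)) : Int)
      = (((b.headD []).length : Int) - (pvDiffRow b t (b.headD []).length 0).sum) from hX]

theorem pv_solution_eq (b t : List (List Int)) (hpre : Pre_solution b t) :
    solution b t = solution_alt b t := by
  obtain ⟨hb, -, -, -, hsh, hsize⟩ := hpre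
  have hR : 0 < b.length := List.length_pos_iff.mpr hb
  have hB0 := pvCnt_bounds ((List.range b.length).map (fun r => (List.range (b.headD []).length).map (fun c => PySem.Int.bxor ((b.getD r []).getD c 0) ((t.getD r []).getD c 0))))
      (b.headD []).length (b.length - 1) 0 (Or.inl rfl)
  have hB1 := pvCnt_bounds ((List.range b.length).map (fun r => (List.range (b.headD []).length).map (fun c => PySem.Int.bxor ((b.getD r []).getD c 0) ((t.getD r []).getD c 0))))
      (b.headD []).length (b.length - 1) 1 (Or.inr rfl)
  rw [pvA_eq b t hb, pvAltB_eq b t,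
    pvOk_eq b t hb hsh 0 (Or.inl rfl), pvOk_eq b t hb hsh 1 (Or.inr rfl)]
  cases hbin : pvBinB b t (b.headD []).length
  · simp
  · cases hcls : pvClsB b t (b.headD []).length (b.length - 1)
    · simp
    · simp only [Bool.and_self, if_true]
      have h9 : pvCnt ((List.range b.length).map (fun r => (List.range (b.headD []).length).map (fun c => PySem.Int.bxor ((b.getD r []).getD c 0) ((t.getD r []).getD c 0)))) (b.headD []).length (b.length - 1) 0 < 1000000000 := by
        have h2 := hB0.2
        omega
      have h9' : pvCnt ((List.range b.length).map (fun r => (List.range (b.headD []).length).map (fun c => PySem.Int.bxor ((b.getD r []).getD c 0) ((t.getD r []).getD c 0)))) (b.headD []).length (b.length - 1) 1 < 1000000000 := by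
        have h2 := hB1.2
        omega
      have hmle := min_le_right
        (pvCnt ((List.range b.length).map (fun r => (List.range (b.headD []).length).map (fun c => PySem.Int.bxor ((b.getD r []).getD c 0) ((t.getD r []).getD c 0)))) (b.headD []).length (b.length - 1) 1)
        (pvCnt ((List.range b.length).map (fun r => (List.range (b.headD []).length).map (fun c => PySem.Int.bxor ((b.getD r []).getD c 0) ((t.getD r []).getD c 0)))) (b.headD []).length (b.length - 1) 0)
      rw [if_neg (show ¬ ((min
          (pvCnt ((List.range b.length).map (fun r => (List.range (b.headD []).length).map (fun c => PySem.Int.bxor ((b.getD r []).getD c 0) ((t.getD r []).getD c 0)))) (b.headD []).length (b.length - 1) 1)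
          (pvCnt ((List.range b.length).map (fun r => (List.range (b.headD []).length).map (fun c => PySem.Int.bxor ((b.getD r []).getD c 0) ((t.getD r []).getD c 0)))) (b.headD []).length (b.length - 1) 0)
          == (1000000000 : Int)) = true) from by
        simp only [beq_iff_eq]
        omega)]
      rw [pvCnt_eq0 b t hb hsh hbin hcls, pvCnt_eq1 b t hb hsh hbin hcls]
      exact min_comm _ _

-- ===== VERDICT (by name: the statement is the Claim_ definition above) =====
theorem solution_spec : Claim_equal_solution := by
  intro b t _ hpre
  exact pv_solution_eq b t hpre
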